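-- pv_equiv track=rewrite | github.com/erturkmemmedli/Hacker-Rank-Solutions | Algorithms/Graph Theory/storyOfATree.py | storyOfATree
-- ===== SOURCE A (Python) =====
-- import math
--
-- def storyOfATree(n, edges, k, guesses):
--     # Write your code here
--     guesses = {tuple(g) for g in guesses}
--     tree = {}
--
--     for u, v in edges:
--         tree.setdefault(u, []).append(v)
--         tree.setdefault(v, []).append(u)
--
--     cost = calculate_cost(tree, guesses)
--     success = calculate_success(tree, guesses, cost, k)
--     g = math.gcd(success, n)
--
--     return "0/1" if success == 0 else f"{success//g}/{n//g}"
--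
-- def calculate_cost(tree, guesses):
--     root = 1
--     visited = {root}
--     stack = [root]
--     count = 0
--
--     while stack:
--         root = stack.pop()
--
--         for node in tree[root]:
--             if node not in visited:
--                 visited.add(node)
--                 count += ((root, node) in guesses)
--                 stack.append(node)
--
--     return count
--
-- def calculate_success(tree, guesses, cost, k):
--     root = 1
--     visited = {root}
--     stack = [(root, cost)]
--     success = 0
--
--     while stack:
--         root, cost = stack.pop()
--         success += (cost >= k)
--
--         for node in tree[root]:
--             if node not in visited:
--                 visited.add(node)
--                 new_cost = cost - ((root, node) in guesses) + ((node, root) in guesses)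
--                 stack.append((node, new_cost))
--
--     return success
-- ===== SOURCE B (Python) =====
-- import math
--
-- def storyOfATree(n, edges, k, guesses):
--     # One traversal instead of two: track per-node cost DELTAS relative to the
--     # root while simultaneously summing the root's cost, then count successes.
--     gs = {tuple(g) for g in guesses}
--     adj = {}
--     for u, v in edges:
--         adj.setdefault(u, []).append(v)
--         adj.setdefault(v, []).append(u)
--     visited = {1}
--     stack = [(1, 0)]
--     cost0 = 0
--     deltas = []
--     while stack:
--         node, d = stack.pop()
--         deltas.append(d)
--         for nb in adj[node]:
--             if nb not in visited:
--                 visited.add(nb)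
--                 cost0 += (node, nb) in gs
--                 stack.append((nb, d - ((node, nb) in gs) + ((nb, node) in gs)))
--     success = sum(cost0 + d >= k for d in deltas)
--     g = math.gcd(success, n)
--     return "0/1" if success == 0 else f"{success//g}/{n//g}"
-- ===== Notes on version B (the rewrite author's own statement) =====
-- stated objective: alternative
-- what changed: A traverses the tree twice (one stack DFS to compute the root's cost, a second stack DFS re-propagating absolute costs and counting successes); B makes a single traversal that accumulates the root cost and per-node cost deltas simultaneously, counting successes afterwards from cost0+delta.
import Mathlib
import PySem

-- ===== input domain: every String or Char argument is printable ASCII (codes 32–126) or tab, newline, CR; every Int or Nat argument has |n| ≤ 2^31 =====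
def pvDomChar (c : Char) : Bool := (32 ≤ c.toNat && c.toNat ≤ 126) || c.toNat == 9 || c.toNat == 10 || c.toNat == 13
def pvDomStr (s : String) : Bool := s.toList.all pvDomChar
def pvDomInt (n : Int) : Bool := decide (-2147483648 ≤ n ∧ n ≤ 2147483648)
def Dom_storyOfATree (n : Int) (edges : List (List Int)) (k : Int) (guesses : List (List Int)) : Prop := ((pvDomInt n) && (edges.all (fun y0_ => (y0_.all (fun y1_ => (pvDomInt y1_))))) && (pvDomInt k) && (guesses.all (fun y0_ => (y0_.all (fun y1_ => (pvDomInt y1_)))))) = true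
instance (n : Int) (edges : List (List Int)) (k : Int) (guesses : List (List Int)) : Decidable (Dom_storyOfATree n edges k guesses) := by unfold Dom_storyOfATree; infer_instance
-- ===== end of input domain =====

-- B replaces A's two stack traversals (root cost, then absolute-cost re-propagation with
-- success counting) by ONE traversal accumulating the root cost and per-node cost deltas,
-- counting successes afterwards; objective: alternative decomposition, same cost.

-- ===== PORT A =====
-- shared with B (both Pythons build the guess set / adjacency dict identically):
-- ((a, b) in guesses) as an Int
def pvInd (gs : PySem.Set (List Int)) (a b : Int) : Int :=
  if PySem.Set.contains gs [a, b] then 1 else 0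

-- tree.setdefault(u, []).append(v); tree.setdefault(v, []).append(u)
def pvTree (edges : List (List Int)) : PySem.Dict Int (List Int) :=
  edges.foldl (fun d e =>
    match e with
    | [u, v] =>
      let d1 := d.insert u (d.getD u [] ++ [v])
      d1.insert v (d1.getD v [] ++ [u])
    | _ => d) PySem.Dict.empty

-- inner 'for node in tree[root]' of calculate_cost (stack kept head-as-top)
def stepA1 (gs : PySem.Set (List Int)) (root : Int) (nbrs : List Int)
    (visited : PySem.Set Int) (count : Int) (st : List Int) :
    PySem.Set Int × Int × List Int :=
  match nbrs with
  | [] => (visited, count, st)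
  | nb :: rest =>
    if PySem.Set.contains visited nb then stepA1 gs root rest visited count st
    else stepA1 gs root rest (PySem.Set.add visited nb) (count + pvInd gs root nb) (nb :: st)

-- 'while stack' of calculate_cost (fuel-guarded; the fuel passed always suffices)
def loopA1 (gs : PySem.Set (List Int)) (tree : PySem.Dict Int (List Int)) :
    Nat → List Int → PySem.Set Int → Int → Int
  | 0, _, _, count => count
  | _ + 1, [], _, count => count
  | fuel + 1, root :: rest, visited, count =>
    let s := stepA1 gs root (tree.getD root []) visited count rest
    loopA1 gs tree fuel s.2.2 s.1 s.2.1

-- inner 'for node in tree[root]' of calculate_success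
def stepA2 (gs : PySem.Set (List Int)) (root : Int) (c : Int) (nbrs : List Int)
    (visited : PySem.Set Int) (st : List (Int × Int)) :
    PySem.Set Int × List (Int × Int) :=
  match nbrs with
  | [] => (visited, st)
  | nb :: rest =>
    if PySem.Set.contains visited nb then stepA2 gs root c rest visited st
    else stepA2 gs root c rest (PySem.Set.add visited nb)
      ((nb, c - pvInd gs root nb + pvInd gs nb root) :: st)

-- 'while stack' of calculate_success
def loopA2 (gs : PySem.Set (List Int)) (tree : PySem.Dict Int (List Int)) (k : Int) :
    Nat → List (Int × Int) → PySem.Set Int → Int → Int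
  | 0, _, _, success => success
  | _ + 1, [], _, success => success
  | fuel + 1, (root, c) :: rest, visited, success =>
    let s := stepA2 gs root c (tree.getD root []) visited rest
    loopA2 gs tree k fuel s.2 s.1 (success + if k ≤ c then 1 else 0)

def storyOfATree (n : Int) (edges : List (List Int)) (k : Int) (guesses : List (List Int)) : String :=
  let gs := PySem.Set.ofList guesses
  let tree := pvTree edges
  let fuel := 2 * edges.length + 2
  let cost := loopA1 gs tree fuel [1] (PySem.Set.ofList [(1 : Int)]) 0
  let success := loopA2 gs tree k fuel [(1, cost)] (PySem.Set.ofList [(1 : Int)]) 0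
  let g : Int := Int.gcd success n
  if success = 0 then "0/1"
  else PySem.Int.toStr (PySem.Int.floordiv success g) ++ "/" ++ PySem.Int.toStr (PySem.Int.floordiv n g)

-- ===== PORT B =====
-- inner 'for nb in adj[node]' of B's single traversal
def stepB (gs : PySem.Set (List Int)) (node d : Int) (nbrs : List Int)
    (visited : PySem.Set Int) (c0 : Int) (st : List (Int × Int)) :
    PySem.Set Int × Int × List (Int × Int) :=
  match nbrs with
  | [] => (visited, c0, st)
  | nb :: rest =>
    if PySem.Set.contains visited nb then stepB gs node d rest visited c0 st
    else stepB gs node d rest (PySem.Set.add visited nb) (c0 + pvInd gs node nb)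
      ((nb, d - pvInd gs node nb + pvInd gs nb node) :: st)

-- B's single 'while stack': returns (root cost, list of per-node deltas)
def loopB (gs : PySem.Set (List Int)) (tree : PySem.Dict Int (List Int)) :
    Nat → List (Int × Int) → PySem.Set Int → Int → List Int → Int × List Int
  | 0, _, _, c0, ds => (c0, ds)
  | _ + 1, [], _, c0, ds => (c0, ds)
  | fuel + 1, (node, d) :: rest, visited, c0, ds =>
    let s := stepB gs node d (tree.getD node []) visited c0 rest
    loopB gs tree fuel s.2.2 s.1 s.2.1 (ds ++ [d])

def storyOfATree_alt (n : Int) (edges : List (List Int)) (k : Int) (guesses : List (List Int)) : String :=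
  let gs := PySem.Set.ofList guesses
  let tree := pvTree edges
  let r := loopB gs tree (2 * edges.length + 2) [((1 : Int), (0 : Int))] (PySem.Set.ofList [(1 : Int)]) 0 []
  let success : Int := Int.ofNat (r.2.countP (fun d => decide (k ≤ r.1 + d)))
  if success = 0 then "0/1"
  else
    let g : Int := Int.gcd success n
    PySem.Int.toStr (PySem.Int.floordiv success g) ++ "/" ++ PySem.Int.toStr (PySem.Int.floordiv n g)

-- ===== PRECONDITION & SPEC =====
-- Pre_ excludes exactly the inputs where the Python A raises: an edge that is not a
-- pair (unpacking ValueError) or no edge touching node 1 (tree[1] KeyError).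
def Pre_storyOfATree (n : Int) (edges : List (List Int)) (k : Int) (guesses : List (List Int)) : Prop :=
  (∀ e ∈ edges, e.length = 2) ∧ (∃ e ∈ edges, (1 : Int) ∈ e)
instance (n : Int) (edges : List (List Int)) (k : Int) (guesses : List (List Int)) : Decidable (Pre_storyOfATree n edges k guesses) := by unfold Pre_storyOfATree; infer_instance

def pvWitness_storyOfATree : Int × List (List Int) × Int × List (List Int) :=
  (3, [[1, 2], [1, 3]], 1, [[1, 2]])

def Spec_storyOfATree (n : Int) (edges : List (List Int)) (k : Int) (guesses : List (List Int)) (out : String) : Prop := out = storyOfATree_alt n edges k guesses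
instance (n : Int) (edges : List (List Int)) (k : Int) (guesses : List (List Int)) (out : String) : Decidable (Spec_storyOfATree n edges k guesses out) := by unfold Spec_storyOfATree; infer_instance

-- ===== CLAIM (what is proved, stated in full; the proofs are below) =====
def Claim_equal_storyOfATree : Prop := ∀ (n : Int) (edges : List (List Int)) (k : Int) (guesses : List (List Int)), Dom_storyOfATree n edges k guesses → Pre_storyOfATree n edges k guesses → Spec_storyOfATree n edges k guesses (storyOfATree n edges k guesses)

-- ===== LEMMAS AND PROOFS =====

-- A's first inner fold is B's inner fold forgetting deltas and keeping the cost.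
theorem stepA1_eq_stepB (gs : PySem.Set (List Int)) (root d : Int) (nbrs : List Int)
    (visited : PySem.Set Int) (c : Int) (st : List (Int × Int)) :
    stepA1 gs root nbrs visited c (st.map Prod.fst) =
      ((stepB gs root d nbrs visited c st).1, (stepB gs root d nbrs visited c st).2.1,
       (stepB gs root d nbrs visited c st).2.2.map Prod.fst) := by
  induction nbrs generalizing visited c st with
  | nil => simp [stepA1, stepB]
  | cons nb rest ih =>
    simp only [stepA1, stepB]
    split
    · exact ih ..
    · exact ih _ _ ((nb, d - pvInd gs root nb + pvInd gs nb root) :: st)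

-- A's second inner fold is B's inner fold with every delta shifted by C.
theorem stepA2_eq_stepB (gs : PySem.Set (List Int)) (root : Int) (C d c0 : Int) (nbrs : List Int)
    (visited : PySem.Set Int) (st : List (Int × Int)) :
    stepA2 gs root (C + d) nbrs visited (st.map (fun p => (p.1, C + p.2))) =
      ((stepB gs root d nbrs visited c0 st).1,
       (stepB gs root d nbrs visited c0 st).2.2.map (fun p => (p.1, C + p.2))) := by
  induction nbrs generalizing visited c0 st with
  | nil => simp [stepA2, stepB]
  | cons nb rest ih =>
    simp only [stepA2, stepB]
    split
    · exact ih ..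
    · have := ih (c0 + pvInd gs root nb) (PySem.Set.add visited nb)
        ((nb, d - pvInd gs root nb + pvInd gs nb root) :: st)
      simpa [show C + d - pvInd gs root nb + pvInd gs nb root
               = C + (d - pvInd gs root nb + pvInd gs nb root) by ring] using this

-- loopB's delta list is an accumulator: splitting it off changes nothing else.
theorem loopB_acc (gs : PySem.Set (List Int)) (tree : PySem.Dict Int (List Int))
    (fuel : Nat) (st : List (Int × Int)) (visited : PySem.Set Int) (c0 : Int) (ds : List Int) :
    loopB gs tree fuel st visited c0 ds =
      ((loopB gs tree fuel st visited c0 []).1, ds ++ (loopB gs tree fuel st visited c0 []).2) := by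
  induction fuel generalizing st visited c0 ds with
  | zero => simp [loopB]
  | succ fuel ih =>
    match st with
    | [] => simp [loopB]
    | (node, d) :: rest =>
      simp only [loopB]
      rw [ih _ _ _ (ds ++ [d]), ih _ _ _ ([] ++ [d])]
      simp

-- A's first loop computes exactly loopB's cost component.
theorem loopA1_eq_loopB (gs : PySem.Set (List Int)) (tree : PySem.Dict Int (List Int))
    (fuel : Nat) (st : List (Int × Int)) (visited : PySem.Set Int) (c0 : Int) (ds : List Int) :
    loopA1 gs tree fuel (st.map Prod.fst) visited c0 =
      (loopB gs tree fuel st visited c0 ds).1 := by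
  induction fuel generalizing st visited c0 ds with
  | zero => simp [loopA1, loopB]
  | succ fuel ih =>
    match st with
    | [] => simp [loopA1, loopB]
    | (node, d) :: rest =>
      simp only [List.map_cons, loopA1, loopB]
      rw [stepA1_eq_stepB gs node d]
      exact ih ..

-- A's second loop counts k ≤ C + delta over loopB's delta list.
theorem loopA2_eq_loopB (gs : PySem.Set (List Int)) (tree : PySem.Dict Int (List Int)) (k : Int)
    (fuel : Nat) (st : List (Int × Int)) (visited : PySem.Set Int) (s C c0 : Int) :
    loopA2 gs tree k fuel (st.map (fun p => (p.1, C + p.2))) visited s =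
      s + Int.ofNat (((loopB gs tree fuel st visited c0 []).2).countP (fun d => decide (k ≤ C + d))) := by
  induction fuel generalizing st visited s c0 with
  | zero => simp [loopA2, loopB]
  | succ fuel ih =>
    match st with
    | [] => simp [loopA2, loopB]
    | (node, d) :: rest =>
      simp only [List.map_cons, loopA2, loopB]
      rw [stepA2_eq_stepB gs node C d c0]
      rw [ih _ _ _ ((stepB gs node d (tree.getD node []) visited c0 rest).2.1)]
      rw [loopB_acc _ _ _ _ _ _ ([] ++ [d])]
      simp only [List.nil_append, List.countP_append, List.countP_cons, List.countP_nil]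
      by_cases h : k ≤ C + d <;> simp [h] <;> omega

-- the two ports are equal on every input
theorem ports_eq (n : Int) (edges : List (List Int)) (k : Int) (guesses : List (List Int)) :
    storyOfATree n edges k guesses = storyOfATree_alt n edges k guesses := by
  unfold storyOfATree storyOfATree_alt
  simp only []
  set gs := PySem.Set.ofList guesses
  set tree := pvTree edges
  set fuel := 2 * edges.length + 2 with hfuel
  set r := loopB gs tree fuel [((1 : Int), (0 : Int))] (PySem.Set.ofList [(1 : Int)]) 0 [] with hr
  have hcost : loopA1 gs tree fuel [1] (PySem.Set.ofList [(1 : Int)]) 0 = r.1 := by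
    have := loopA1_eq_loopB gs tree fuel [((1 : Int), (0 : Int))] (PySem.Set.ofList [(1 : Int)]) 0 []
    simpa using this
  rw [hcost]
  have hsucc : loopA2 gs tree k fuel [(1, r.1)] (PySem.Set.ofList [(1 : Int)]) 0 =
      Int.ofNat (r.2.countP (fun d => decide (k ≤ r.1 + d))) := by
    have := loopA2_eq_loopB gs tree k fuel [((1 : Int), (0 : Int))] (PySem.Set.ofList [(1 : Int)]) 0 r.1 0
    simpa using this
  rw [hsucc]

-- ===== VERDICT (by name: the statement is the Claim_ definition above) =====
theorem storyOfATree_spec : Claim_equal_storyOfATree := by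
  intro n edges k guesses _ _
  unfold Spec_storyOfATree
  exact ports_eq n edges k guesses
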